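-- pv_equiv track=rewrite | github.com/songye38/2023_algorithm_study | 프로그래머스/1/42840. 모의고사/모의고사.py | solution
-- ===== SOURCE A (Python) =====
-- def get_max_score(answers,answer_pattern):
--
--     user1_answers = answer_pattern
--     user1_count = 0
--     len_u1 = len(user1_answers)
--
--     if len(answers) <= len(user1_answers):
--         for i in range(len(answers)):
--             if answers[i] == user1_answers[i]:
--                 user1_count +=1
--     else:
--         for i in range(len(answers)//len_u1):
--             for j in range(len_u1):
--                 if answers[len_u1 * i + j] == user1_answers[j]:
--                     user1_count +=1
--         for i in range(len(answers)%len_u1):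
--             if answers[(len_u1 * (len(answers)//len_u1))+i]== user1_answers[i]:
--                 user1_count +=1
--     return user1_count
--
-- def solution(answers):
--     answer = []
--     user1 = get_max_score(answers,[1,2,3,4,5])
--     user2 = get_max_score(answers,[2, 1, 2, 3, 2, 4, 2, 5])
--     user3 = get_max_score(answers,[3, 3, 1, 1, 2, 2, 4, 4, 5, 5])
--     score_list = [user1,user2,user3]
--     max_val = max(score_list)
--     for i in range(3):
--         if score_list[i] == max_val:
--             answer.append(i+1)
--     return answer
-- ===== SOURCE B (Python) =====
-- def solution(answers):
--     p1, p2, p3 = [1, 2, 3, 4, 5], [2, 1, 2, 3, 2, 4, 2, 5], [3, 3, 1, 1, 2, 2, 4, 4, 5, 5]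
--     s1 = s2 = s3 = 0
--     for i, a in enumerate(answers):
--         if a == p1[i % 5]:
--             s1 += 1
--         if a == p2[i % 8]:
--             s2 += 1
--         if a == p3[i % 10]:
--             s3 += 1
--     scores = (s1, s2, s3)
--     best = max(scores)
--     return [j + 1 for j in range(3) if scores[j] == best]
-- ===== Notes on version B (the rewrite author's own statement) =====
-- stated objective: simpler
-- what changed: Replaces A's per-pattern helper with its three-way branch on length and block/remainder double loop (three separate scans of answers) by a single pass over enumerate(answers) keeping three counters and comparing each answer to pattern[i % len] cyclically, so the answers list is traversed once instead of three times.
import Mathlib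
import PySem

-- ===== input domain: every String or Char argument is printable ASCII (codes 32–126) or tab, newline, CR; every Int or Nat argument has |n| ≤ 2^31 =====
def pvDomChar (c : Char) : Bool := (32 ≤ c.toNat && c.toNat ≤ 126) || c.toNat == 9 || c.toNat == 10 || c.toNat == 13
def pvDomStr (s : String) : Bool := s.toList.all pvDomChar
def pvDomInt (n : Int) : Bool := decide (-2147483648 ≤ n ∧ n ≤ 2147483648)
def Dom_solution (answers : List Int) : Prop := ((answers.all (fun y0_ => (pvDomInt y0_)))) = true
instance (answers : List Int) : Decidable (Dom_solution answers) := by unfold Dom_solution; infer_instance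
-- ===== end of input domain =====

-- B replaces A's three block-decomposed scans (get_max_score called per pattern) by a single
-- pass over enumerate(answers) with three counters and cyclic i % len(pattern) indexing (objective: simpler).

-- ===== PORT A =====
-- literal port of get_max_score: all indices are provably in range, so answers[i] is List.getD
def get_max_score (answers : List Int) (answer_pattern : List Int) : Int :=
  let len_u1 := answer_pattern.length
  if answers.length ≤ answer_pattern.length then
    (List.range answers.length).foldl
      (fun c i => if answers.getD i 0 = answer_pattern.getD i 0 then c + 1 else c) 0
  else
    let c1 := (List.range (answers.length / len_u1)).foldl
      (fun c i => (List.range len_u1).foldl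
        (fun c j => if answers.getD (len_u1 * i + j) 0 = answer_pattern.getD j 0 then c + 1 else c) c) 0
    (List.range (answers.length % len_u1)).foldl
      (fun c i => if answers.getD (len_u1 * (answers.length / len_u1) + i) 0 = answer_pattern.getD i 0 then c + 1 else c) c1

def solution (answers : List Int) : List Int :=
  let user1 := get_max_score answers [1, 2, 3, 4, 5]
  let user2 := get_max_score answers [2, 1, 2, 3, 2, 4, 2, 5]
  let user3 := get_max_score answers [3, 3, 1, 1, 2, 2, 4, 4, 5, 5]
  let score_list := [user1, user2, user3]
  let max_val := (PySem.List.max? score_list (fun y => y)).getD 0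
  (List.range 3).foldl
    (fun answer i => if score_list.getD i 0 = max_val then answer ++ [(i : Int) + 1] else answer) []

-- ===== PORT B =====
def solution_alt (answers : List Int) : List Int :=
  let p1 : List Int := [1, 2, 3, 4, 5]
  let p2 : List Int := [2, 1, 2, 3, 2, 4, 2, 5]
  let p3 : List Int := [3, 3, 1, 1, 2, 2, 4, 4, 5, 5]
  let s := (PySem.List.enumerate answers).foldl
    (fun (s : Int × Int × Int) ia =>
      (if ia.2 = PySem.List.pyGetD p1 (PySem.Int.mod ia.1 5) 0 then s.1 + 1 else s.1,
       if ia.2 = PySem.List.pyGetD p2 (PySem.Int.mod ia.1 8) 0 then s.2.1 + 1 else s.2.1,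
       if ia.2 = PySem.List.pyGetD p3 (PySem.Int.mod ia.1 10) 0 then s.2.2 + 1 else s.2.2))
    ((0 : Int), (0 : Int), (0 : Int))
  let scores : List Int := [s.1, s.2.1, s.2.2]
  let best := (PySem.List.max? scores (fun y => y)).getD 0
  ((List.range 3).filter (fun j => scores.getD j 0 = best)).map (fun (j : Nat) => (j : Int) + 1)

-- ===== PRECONDITION & SPEC =====
def Spec_solution (answers : List Int) (out : List Int) : Prop := out = solution_alt answers
instance (answers : List Int) (out : List Int) : Decidable (Spec_solution answers out) := by unfold Spec_solution; infer_instance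

-- ===== CLAIM (what is proved, stated in full; the proofs are below) =====
def Claim_equal_solution : Prop := ∀ (answers : List Int), Dom_solution answers → Spec_solution answers (solution answers)

-- ===== LEMMAS AND PROOFS =====

-- the common specification: number of positions matching the pattern cyclically
def cntSpec (answers pat : List Int) : Int :=
  ((List.range answers.length).countP
    (fun k => answers.getD k 0 = pat.getD (k % pat.length) 0) : Int)

theorem sum_map_natCast {α : Type} (l : List α) (g : α → Nat) :
    (l.map (fun x => ((g x : Nat) : Int))).sum = (((l.map g).sum : Nat) : Int) := by
  induction l with
  | nil => simp
  | cons x t ih => simp [ih]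

-- block decomposition of countP over range (m*q)
theorem countP_range_mul (m q : Nat) (p : Nat → Bool) :
    (List.range (m * q)).countP p
      = ((List.range q).map (fun i => (List.range m).countP (fun j => p (m * i + j)))).sum := by
  induction q with
  | zero => simp
  | succ q ih =>
      have h : m * (q + 1) = m * q + m := by ring
      rw [h, List.range_add, List.countP_append, ih, List.range_succ, List.map_append,
        List.sum_append, List.countP_map]
      simp [Function.comp_def]

theorem get_max_score_eq (answers pat : List Int) (h : 0 < pat.length) :
    get_max_score answers pat = cntSpec answers pat := by
  unfold get_max_score cntSpec
  by_cases hle : answers.length ≤ pat.length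
  · rw [if_pos hle, PySem.List.foldl_ite_add_one]
    have hc : (List.range answers.length).countP (fun i => decide (answers.getD i 0 = pat.getD i 0))
        = (List.range answers.length).countP
            (fun k => decide (answers.getD k 0 = pat.getD (k % pat.length) 0)) := by
      apply List.countP_congr
      intro k hk
      have hk' : k < answers.length := List.mem_range.mp hk
      simp [Nat.mod_eq_of_lt (lt_of_lt_of_le hk' hle)]
    rw [hc]; ring
  · rw [if_neg hle]
    rw [PySem.List.foldl_ite_add_one]
    have outer : (List.range (answers.length / pat.length)).foldl
        (fun c i => (List.range pat.length).foldl
          (fun c j => if answers.getD (pat.length * i + j) 0 = pat.getD j 0 then c + 1 else c) c) 0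
        = ((List.range (answers.length / pat.length)).map
            (fun i => (((List.range pat.length).countP
              (fun j => decide (answers.getD (pat.length * i + j) 0 = pat.getD j 0)) : Nat) : Int))).sum := by
      rw [PySem.List.foldl_congr_mem (g := fun c i =>
        c + (((List.range pat.length).countP
          (fun j => decide (answers.getD (pat.length * i + j) 0 = pat.getD j 0)) : Nat) : Int))
        (h := by intro acc x _; rw [PySem.List.foldl_ite_add_one])]
      rw [PySem.List.foldl_add]
      simp
    rw [outer, sum_map_natCast]
    have key : (List.range answers.length).countP
          (fun k => decide (answers.getD k 0 = pat.getD (k % pat.length) 0))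
        = ((List.range (answers.length / pat.length)).map
            (fun i => (List.range pat.length).countP
              (fun j => decide (answers.getD (pat.length * i + j) 0 = pat.getD j 0)))).sum
          + (List.range (answers.length % pat.length)).countP
              (fun i => decide (answers.getD (pat.length * (answers.length / pat.length) + i) 0 = pat.getD i 0)) := by
      conv_lhs => rw [(Nat.div_add_mod answers.length pat.length).symm]
      rw [List.range_add, List.countP_append, countP_range_mul, List.countP_map]
      congr 1
      · apply congrArg List.sum
        apply List.map_congr_left
        intro i _
        apply List.countP_congr
        intro j hj
        have hj' : j < pat.length := List.mem_range.mp hj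
        simp [Nat.mod_eq_of_lt hj']
      · apply List.countP_congr
        intro i hi
        have hi' : i < answers.length % pat.length := List.mem_range.mp hi
        have hi2 : i < pat.length := lt_of_lt_of_le hi' (Nat.le_of_lt (Nat.mod_lt _ h))
        simp [Nat.mod_eq_of_lt hi2]
    rw [key]
    push_cast
    ring

-- B-side: a single-pattern count over enumerate(answers) is the same cyclic-match count
theorem cnt_enum (answers pat : List Int) (m : Int) (h : 0 < pat.length)
    (hm : m = (pat.length : Int)) :
    (((PySem.List.enumerate answers).countP
        (fun ia => decide (ia.2 = PySem.List.pyGetD pat (PySem.Int.mod ia.1 m) 0)) : Nat) : Int)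
      = cntSpec answers pat := by
  unfold cntSpec
  rw [PySem.List.enumerate_eq_map_pyRange (d := 0), List.countP_map,
    PySem.List.pyRange_one, List.countP_map]
  congr 1
  apply List.countP_congr
  intro k hk
  have hmpos : (0 : Int) < m := by rw [hm]; exact_mod_cast h
  simp only [Function.comp_def, zero_add, hm] at *
  have hmod : PySem.Int.mod (k : Int) ((pat.length : Nat) : Int) = (((k % pat.length : Nat)) : Int) := by
    rw [PySem.Int.mod_eq_emod_of_pos (by exact_mod_cast h)]
    exact (Int.natCast_mod k pat.length).symm
  rw [hmod]
  simp only [PySem.List.pyGetD_natCast]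

-- split the triple-accumulator fold into three independent folds
theorem foldl_prod3 {α : Type} (l : List α) (f1 f2 f3 : Int → α → Int) (a b c : Int) :
    l.foldl (fun (s : Int × Int × Int) x => (f1 s.1 x, f2 s.2.1 x, f3 s.2.2 x)) (a, b, c)
      = (l.foldl f1 a, l.foldl f2 b, l.foldl f3 c) := by
  induction l generalizing a b c with
  | nil => rfl
  | cons x t ih => simp [List.foldl, ih]

theorem solution_eq (answers : List Int) : solution answers = solution_alt answers := by
  simp only [solution, solution_alt]
  rw [get_max_score_eq answers [1, 2, 3, 4, 5] (by decide),
    get_max_score_eq answers [2, 1, 2, 3, 2, 4, 2, 5] (by decide),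
    get_max_score_eq answers [3, 3, 1, 1, 2, 2, 4, 4, 5, 5] (by decide)]
  rw [foldl_prod3 (PySem.List.enumerate answers)
    (fun a ia => if ia.2 = PySem.List.pyGetD [1, 2, 3, 4, 5] (PySem.Int.mod ia.1 5) 0 then a + 1 else a)
    (fun a ia => if ia.2 = PySem.List.pyGetD [2, 1, 2, 3, 2, 4, 2, 5] (PySem.Int.mod ia.1 8) 0 then a + 1 else a)
    (fun a ia => if ia.2 = PySem.List.pyGetD [3, 3, 1, 1, 2, 2, 4, 4, 5, 5] (PySem.Int.mod ia.1 10) 0 then a + 1 else a)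
    0 0 0]
  simp only [PySem.List.foldl_ite_add_one, zero_add]
  rw [cnt_enum answers [1, 2, 3, 4, 5] 5 (by decide) (by decide),
    cnt_enum answers [2, 1, 2, 3, 2, 4, 2, 5] 8 (by decide) (by decide),
    cnt_enum answers [3, 3, 1, 1, 2, 2, 4, 4, 5, 5] 10 (by decide) (by decide)]
  rw [PySem.List.foldl_append_ite]
  simp only [List.nil_append]

-- ===== VERDICT (by name: the statement is the Claim_ definition above) =====
theorem solution_spec : Claim_equal_solution := by
  intro answers _
  unfold Spec_solution
  exact solution_eq answers
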